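-- pv_equiv track=rewrite | github.com/clement7903/-DataStructuresAlgorithms---kattis | IT5001/liquid_assets.py | remove_adj_repeated_letters
-- ===== SOURCE A (Python) =====
-- def remove_adj_repeated_letters(stringofwords):
--   if not stringofwords:
--     return ''
--   if len(stringofwords) == 1:
--     return stringofwords
--   if stringofwords[0] == stringofwords[1]:
--     return remove_adj_repeated_letters(stringofwords[1:])
--   return stringofwords[0] + remove_adj_repeated_letters(stringofwords[1:])
-- ===== SOURCE B (Python) =====
-- def remove_adj_repeated_letters(stringofwords):
--     out = []
--     i = 0
--     n = len(stringofwords)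
--     while i < n:
--         c = stringofwords[i]
--         out.append(c)
--         i += 1
--         while i < n and stringofwords[i] == c:
--             i += 1
--     return ''.join(out)
-- ===== Notes on version B (the rewrite author's own statement) =====
-- stated objective: faster
-- what changed: Replaces A's quadratic recursion (each step slices the string and concatenates onto the recursive result) with a single iterative pass that emits each run's first character and skips the rest of the run into a list joined once.
import Mathlib
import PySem

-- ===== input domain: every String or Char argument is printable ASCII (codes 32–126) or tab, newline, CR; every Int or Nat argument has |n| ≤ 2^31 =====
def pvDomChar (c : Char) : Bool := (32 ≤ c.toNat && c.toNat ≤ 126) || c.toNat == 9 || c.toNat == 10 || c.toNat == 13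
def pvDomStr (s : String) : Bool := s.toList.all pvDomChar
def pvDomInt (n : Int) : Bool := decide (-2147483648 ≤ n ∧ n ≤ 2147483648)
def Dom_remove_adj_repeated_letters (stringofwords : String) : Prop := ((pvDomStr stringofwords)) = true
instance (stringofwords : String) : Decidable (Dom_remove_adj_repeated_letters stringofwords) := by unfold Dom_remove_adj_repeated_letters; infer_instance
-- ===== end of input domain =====

-- B is a single left-to-right pass that skips each run, replacing A's quadratic slice-and-concat recursion; return value only, no mutation.

-- ===== PORT A =====
-- A's recursion on the string: empty → '', singleton → itself, else drop or keep the head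
-- depending on whether it equals the second character, recursing on the tail slice.
def pvARec : List Char → List Char
  | [] => []
  | [c] => [c]
  | a :: b :: rest =>
    if a == b then pvARec (b :: rest)
    else a :: pvARec (b :: rest)

def remove_adj_repeated_letters (stringofwords : String) : String :=
  String.mk (pvARec stringofwords.toList)

-- ===== PORT B =====
-- inner while loop of B: skip the remainder of the current run of character c
def pvSkipRun (c : Char) : List Char → List Char
  | [] => []
  | a :: rest => if a == c then pvSkipRun c rest else a :: rest

theorem pvSkipRun_length_le (c : Char) : ∀ (l : List Char), (pvSkipRun c l).length ≤ l.length := by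
  intro l
  induction l with
  | nil => simp [pvSkipRun]
  | cons a rest ih =>
    simp only [pvSkipRun]
    split
    · exact Nat.le_succ_of_le ih
    · simp

-- outer while loop of B: emit the run's first character, continue after the run
def pvBRec : List Char → List Char
  | [] => []
  | c :: rest => c :: pvBRec (pvSkipRun c rest)
termination_by l => l.length
decreasing_by
  exact Nat.lt_succ_of_le (pvSkipRun_length_le c rest)

def remove_adj_repeated_letters_alt (stringofwords : String) : String :=
  String.mk (pvBRec stringofwords.toList)

-- ===== PRECONDITION & SPEC =====
def Spec_remove_adj_repeated_letters (stringofwords : String) (out : String) : Prop := out = remove_adj_repeated_letters_alt stringofwords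
instance (stringofwords : String) (out : String) : Decidable (Spec_remove_adj_repeated_letters stringofwords out) := by unfold Spec_remove_adj_repeated_letters; infer_instance

-- ===== CLAIM (what is proved, stated in full; the proofs are below) =====
def Claim_equal_remove_adj_repeated_letters : Prop := ∀ (stringofwords : String), Dom_remove_adj_repeated_letters stringofwords → Spec_remove_adj_repeated_letters stringofwords (remove_adj_repeated_letters stringofwords)

-- ===== LEMMAS AND PROOFS =====

theorem pvBRec_cons (c : Char) (t : List Char) : pvBRec (c :: t) = c :: pvBRec (pvSkipRun c t) := by
  rw [pvBRec.eq_def]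

theorem pvARec_cons (t : List Char) : ∀ (c : Char), pvARec (c :: t) = c :: pvBRec (pvSkipRun c t) := by
  induction t with
  | nil => intro c; simp [pvARec, pvSkipRun, pvBRec.eq_def]
  | cons b t' ih =>
    intro c
    simp only [pvARec]
    by_cases h : c == b
    · have hcb : c = b := by exact beq_iff_eq.mp h
      rw [if_pos h, ih b, hcb]
      simp [pvSkipRun]
    · rw [if_neg h, ih b, ← pvBRec_cons]
      have hbc : ¬ b = c := fun e => h (by simp [e])
      simp [pvSkipRun, hbc]

theorem pvARec_eq_pvBRec (l : List Char) : pvARec l = pvBRec l := by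
  cases l with
  | nil => simp [pvARec, pvBRec.eq_def]
  | cons c t => rw [pvARec_cons t c, pvBRec_cons]

-- ===== VERDICT (by name: the statement is the Claim_ definition above) =====
theorem remove_adj_repeated_letters_spec : Claim_equal_remove_adj_repeated_letters := by
  intro s _
  unfold Spec_remove_adj_repeated_letters remove_adj_repeated_letters remove_adj_repeated_letters_alt
  rw [pvARec_eq_pvBRec]
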